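-- pv_equiv track=rewrite | github.com/endsley/vessence | vessence/memory/v2/benchmarks/generate_mock_trees.py | generate_tree_compact
-- ===== SOURCE A (Python) =====
-- def generate_tree_compact(leaves: list[tuple[str, str, str]]) -> str:
--     """Generate compact path format tree index."""
--     # Group by branch/sub
--     tree = {}
--     for path, filename, desc in leaves:
--         parts = path.split("/")
--         if len(parts) == 3:
--             branch, sub, _ = parts
--         else:
--             branch = parts[0]
--             sub = parts[1] if len(parts) > 1 else "misc"
--
--         tree.setdefault(branch, {}).setdefault(sub, []).append(
--             (filename, desc)
--         )
--
--     lines = []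
--     for branch in sorted(tree):
--         lines.append(f"{branch}/")
--         subs = tree[branch]
--         for sub in sorted(subs):
--             lines.append(f"  {sub}/")
--             for filename, desc in sorted(subs[sub]):
--                 lines.append(f"    - {filename}.md -- {desc}")
--     return "\n".join(lines)
-- ===== SOURCE B (Python) =====
-- def generate_tree_compact(leaves):
--     """Generate compact path format tree index."""
--     rows = []
--     for path, filename, desc in leaves:
--         parts = path.split("/")
--         branch = parts[0]
--         sub = parts[1] if len(parts) > 1 else "misc"
--         rows.append((branch, sub, filename, desc))
--     rows.sort()
--     lines = []
--     cur_branch = cur_sub = None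
--     for branch, sub, filename, desc in rows:
--         if branch != cur_branch:
--             lines.append(f"{branch}/")
--             cur_branch, cur_sub = branch, None
--         if sub != cur_sub:
--             lines.append(f"  {sub}/")
--             cur_sub = sub
--         lines.append(f"    - {filename}.md -- {desc}")
--     return "\n".join(lines)
-- ===== Notes on version B (the rewrite author's own statement) =====
-- stated objective: alternative
-- what changed: A groups leaves into a nested dict of dicts of lists and renders it with three sorts per level; B parses each leaf into a flat (branch, sub, filename, desc) row, sorts the row list once by the full tuple, and emits branch/sub headers in a single change-tracking scan.
import Mathlib
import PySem

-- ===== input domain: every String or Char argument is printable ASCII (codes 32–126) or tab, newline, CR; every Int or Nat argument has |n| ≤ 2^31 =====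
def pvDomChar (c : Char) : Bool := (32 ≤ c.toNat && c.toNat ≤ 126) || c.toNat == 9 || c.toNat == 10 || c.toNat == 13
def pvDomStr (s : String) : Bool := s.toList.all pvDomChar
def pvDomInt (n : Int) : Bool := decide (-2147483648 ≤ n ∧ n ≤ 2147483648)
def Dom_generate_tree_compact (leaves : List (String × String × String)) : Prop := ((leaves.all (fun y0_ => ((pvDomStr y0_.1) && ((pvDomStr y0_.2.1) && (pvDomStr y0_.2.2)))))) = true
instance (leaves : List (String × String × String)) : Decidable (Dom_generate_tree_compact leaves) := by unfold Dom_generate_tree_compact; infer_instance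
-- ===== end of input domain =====

-- B replaces A's nested-dict grouping by one flat sort of (branch, sub, filename, desc)
-- rows plus a single header-emitting scan (objective: alternative, same asymptotic cost).

-- ===== PORT A =====
-- branch/sub extraction of A: len(parts)==3 destructuring, else parts[0] / parts[1] / "misc"
def pvBranchSubA (path : String) : String × String :=
  let parts := (PySem.Str.split? path "/").getD []   -- sep "/" ≠ "": split? never returns none
  if parts.length == 3 then (parts.getD 0 "", parts.getD 1 "")
  else (parts.getD 0 "", if 1 < parts.length then parts.getD 1 "" else "misc")

-- tree.setdefault(branch, {}).setdefault(sub, []).append((filename, desc))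
def pvStepA (tree : PySem.Dict String (PySem.Dict String (List (String × String))))
    (leaf : String × String × String) : PySem.Dict String (PySem.Dict String (List (String × String))) :=
  tree.modify (pvBranchSubA leaf.1).1 PySem.Dict.empty
    (fun subs => subs.modify (pvBranchSubA leaf.1).2 [] (fun l => l ++ [(leaf.2.1, leaf.2.2)]))

def generate_tree_compact (leaves : List (String × String × String)) : String :=
  let tree := leaves.foldl pvStepA PySem.Dict.empty
  let lines : List String :=
    (PySem.List.sorted tree.keys (fun x => x)).foldl (fun lines branch =>
      let lines := lines ++ [branch ++ "/"]
      let subs := tree.getD branch PySem.Dict.empty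
      (PySem.List.sorted subs.keys (fun x => x)).foldl (fun lines sub =>
        let lines := lines ++ ["  " ++ sub ++ "/"]
        (PySem.List.sorted2 (subs.getD sub []) (fun p => p.1) (fun p => p.2)).foldl (fun lines fd =>
          lines ++ ["    - " ++ fd.1 ++ ".md -- " ++ fd.2]) lines) lines) []
  PySem.Str.join "\n" lines

-- ===== PORT B =====
-- one flat row (branch, sub, filename, desc) per leaf
def pvQuad (leaf : String × String × String) : String × String × String × String :=
  let parts := (PySem.Str.split? leaf.1 "/").getD []   -- sep "/" ≠ "": split? never returns none
  (parts.getD 0 "", if 1 < parts.length then parts.getD 1 "" else "misc", leaf.2.1, leaf.2.2)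

-- rows.sort(): Python's default tuple order = lexicographic on the four strings
def pvLexKey (q : String × String × String × String) :
    Lex (String × Lex (String × Lex (String × String))) :=
  toLex (q.1, toLex (q.2.1, toLex (q.2.2.1, q.2.2.2)))

-- one step of the header-emitting scan (state: cur_branch, cur_sub, lines)
def pvScanStep (st : Option String × Option String × List String)
    (q : String × String × String × String) : Option String × Option String × List String :=
  let bst := if st.1 ≠ some q.1 then (some q.1, (none : Option String), st.2.2 ++ [q.1 ++ "/"]) else st
  let sst := if bst.2.1 ≠ some q.2.1 then (some q.2.1, bst.2.2 ++ ["  " ++ q.2.1 ++ "/"]) else (bst.2.1, bst.2.2)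
  (bst.1, sst.1, sst.2 ++ ["    - " ++ q.2.2.1 ++ ".md -- " ++ q.2.2.2])

def generate_tree_compact_alt (leaves : List (String × String × String)) : String :=
  let rows := PySem.List.sorted (leaves.map pvQuad) pvLexKey
  let st := rows.foldl pvScanStep (none, none, [])
  PySem.Str.join "\n" st.2.2

-- ===== PRECONDITION & SPEC =====
def Spec_generate_tree_compact (leaves : List (String × String × String)) (out : String) : Prop := out = generate_tree_compact_alt leaves
instance (leaves : List (String × String × String)) (out : String) : Decidable (Spec_generate_tree_compact leaves out) := by unfold Spec_generate_tree_compact; infer_instance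

-- ===== CLAIM (what is proved, stated in full; the proofs are below) =====
def Claim_equal_generate_tree_compact : Prop := ∀ (leaves : List (String × String × String)), Dom_generate_tree_compact leaves → Spec_generate_tree_compact leaves (generate_tree_compact leaves)

-- ===== LEMMAS AND PROOFS =====

-- canonical grouped form both programs are reduced to
def pvLb (Qs : List (String × String × String × String)) (b : String) :
    List (String × String × String × String) := Qs.filter (fun q => q.1 == b)

def pvRows (Qs : List (String × String × String × String)) (b s : String) : List (String × String) :=
  ((pvLb Qs b).filter (fun q => q.2.1 == s)).map (fun q => q.2.2)

def pvSB (Qs : List (String × String × String × String)) : List String :=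
  PySem.List.sorted (PySem.Set.ofList (Qs.map (fun q => q.1))) (fun x => x)

def pvSS (Qs : List (String × String × String × String)) (b : String) : List String :=
  PySem.List.sorted (PySem.Set.ofList ((pvLb Qs b).map (fun q => q.2.1))) (fun x => x)

def pvR (Qs : List (String × String × String × String)) (b s : String) : List (String × String) :=
  PySem.List.sorted2 (pvRows Qs b s) (fun p => p.1) (fun p => p.2)

def pvRow (fd : String × String) : String := "    - " ++ fd.1 ++ ".md -- " ++ fd.2

def pvG (Qs : List (String × String × String × String)) (b s : String) : List String :=
  ("  " ++ s ++ "/") :: (pvR Qs b s).map pvRow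

def pvF (Qs : List (String × String × String × String)) (b : String) : List String :=
  (b ++ "/") :: (pvSS Qs b).flatMap (pvG Qs b)

def pvLines (Qs : List (String × String × String × String)) : List String :=
  (pvSB Qs).flatMap (pvF Qs)

def pvBack (b s : String) (fd : String × String) : String × String × String × String :=
  (b, s, fd.1, fd.2)

def pvC (Qs : List (String × String × String × String)) :
    List (String × String × String × String) :=
  (pvSB Qs).flatMap (fun b => (pvSS Qs b).flatMap (fun s => (pvR Qs b s).map (pvBack b s)))

lemma pvBranchSubA_eq (p : String) :
    pvBranchSubA p = ((pvQuad (p, "", "")).1, (pvQuad (p, "", "")).2.1) := by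
  unfold pvBranchSubA pvQuad
  by_cases h : ((PySem.Str.split? p "/").getD []).length = 3 <;> simp [h]

lemma pvTree_keys (leaves : List (String × String × String)) :
    (leaves.foldl pvStepA PySem.Dict.empty).keys
      = PySem.Set.ofList ((leaves.map pvQuad).map (fun q => q.1)) := by
  have h : pvStepA = fun d x => d.modify ((pvBranchSubA x.1).1) PySem.Dict.empty
      ((fun (_ : PySem.Dict String (PySem.Dict String (List (String × String)))) x subs =>
        subs.modify (pvBranchSubA x.1).2 [] (fun l => l ++ [(x.2.1, x.2.2)])) d x) := rfl
  rw [h, PySem.Dict.keys_foldl_modify_key leaves (fun x => (pvBranchSubA x.1).1)]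
  rw [PySem.Dict.keys_empty, PySem.Set.update_nil_left]
  congr 1
  simp only [List.map_map]
  exact List.map_congr_left (fun a _ => by rw [pvBranchSubA_eq]; rfl)

lemma pvTree_getD (leaves : List (String × String × String))
    (d : PySem.Dict String (PySem.Dict String (List (String × String)))) (b : String) :
    (leaves.foldl pvStepA d).getD b PySem.Dict.empty
      = ((pvLb (leaves.map pvQuad) b).map (fun q => (q.2.1, q.2.2))).foldl
          (fun d p => d.modify p.1 [] (fun l => l ++ [p.2])) (d.getD b PySem.Dict.empty) := by
  induction leaves generalizing d with
  | nil => rfl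
  | cons leaf rest ih =>
    have hq : pvStepA d leaf = d.modify (pvQuad leaf).1 PySem.Dict.empty
        (fun subs => subs.modify (pvQuad leaf).2.1 [] (fun l => l ++ [(leaf.2.1, leaf.2.2)])) := by
      simp only [pvStepA, pvBranchSubA_eq]; rfl
    simp only [List.foldl_cons, List.map_cons, pvLb, List.filter_cons]
    rw [ih, hq]
    by_cases h : (pvQuad leaf).1 = b
    · subst h
      simp only [PySem.Dict.getD_modify, pvLb, beq_self_eq_true]
      rfl
    · simp [PySem.Dict.getD_modify, h, Ne.symm h, pvLb]

lemma pvInner_keys (leaves : List (String × String × String)) (b : String) :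
    ((leaves.foldl pvStepA PySem.Dict.empty).getD b PySem.Dict.empty).keys
      = PySem.Set.ofList ((pvLb (leaves.map pvQuad) b).map (fun q => q.2.1)) := by
  rw [pvTree_getD, PySem.Dict.getD_empty]
  simp only [PySem.Dict.keys_foldl_modify_key]
  rw [PySem.Dict.keys_empty, PySem.Set.update_nil_left]
  simp [List.map_map, Function.comp_def]

lemma pvInner_getD (leaves : List (String × String × String)) (b s : String) :
    ((leaves.foldl pvStepA PySem.Dict.empty).getD b PySem.Dict.empty).getD s []
      = pvRows (leaves.map pvQuad) b s := by
  rw [pvTree_getD, PySem.Dict.getD_empty, PySem.Dict.getD_foldl_modify_append]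
  rw [PySem.Dict.getD_empty, List.filter_map]
  simp [pvRows, List.map_map, Function.comp_def]

lemma pvA_eq_lines (leaves : List (String × String × String)) :
    generate_tree_compact leaves = PySem.Str.join "\n" (pvLines (leaves.map pvQuad)) := by
  have h0 : generate_tree_compact leaves = PySem.Str.join "\n"
      ((PySem.List.sorted (leaves.foldl pvStepA PySem.Dict.empty).keys (fun x => x)).foldl
        (fun lines branch =>
          (PySem.List.sorted ((leaves.foldl pvStepA PySem.Dict.empty).getD branch PySem.Dict.empty).keys (fun x => x)).foldl
            (fun lines sub =>
              (PySem.List.sorted2 (((leaves.foldl pvStepA PySem.Dict.empty).getD branch PySem.Dict.empty).getD sub [])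
                  (fun p => p.1) (fun p => p.2)).foldl
                (fun lines fd => lines ++ ["    - " ++ fd.1 ++ ".md -- " ++ fd.2])
                (lines ++ ["  " ++ sub ++ "/"]))
            (lines ++ [branch ++ "/"])) []) := rfl
  rw [h0]
  congr 1
  have houter : (fun (lines : List String) branch =>
      (PySem.List.sorted ((leaves.foldl pvStepA PySem.Dict.empty).getD branch PySem.Dict.empty).keys (fun x => x)).foldl
        (fun lines sub =>
          (PySem.List.sorted2 (((leaves.foldl pvStepA PySem.Dict.empty).getD branch PySem.Dict.empty).getD sub [])
              (fun p => p.1) (fun p => p.2)).foldl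
            (fun lines fd => lines ++ ["    - " ++ fd.1 ++ ".md -- " ++ fd.2])
            (lines ++ ["  " ++ sub ++ "/"]))
        (lines ++ [branch ++ "/"]))
      = fun lines b => lines ++ pvF (leaves.map pvQuad) b := by
    funext lines b
    have hsub : (fun (lines : List String) sub =>
        (PySem.List.sorted2 (((leaves.foldl pvStepA PySem.Dict.empty).getD b PySem.Dict.empty).getD sub [])
            (fun p => p.1) (fun p => p.2)).foldl
          (fun lines fd => lines ++ ["    - " ++ fd.1 ++ ".md -- " ++ fd.2])
          (lines ++ ["  " ++ sub ++ "/"]))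
        = fun lines s => lines ++ pvG (leaves.map pvQuad) b s := by
      funext lines s
      rw [pvInner_getD leaves b s]
      simp only [PySem.List.foldl_append_singleton_eq_map]
      simp [pvG, pvR, pvRow]
    rw [pvInner_keys leaves b, hsub, PySem.List.foldl_append_eq_flatMap]
    simp [pvF, pvSS]
  rw [pvTree_keys, houter, PySem.List.foldl_append_eq_flatMap]
  simp [pvLines, pvSB]

lemma pvLexKey_injective : Function.Injective pvLexKey := by
  rintro ⟨a1, a2, a3, a4⟩ ⟨b1, b2, b3, b4⟩ h
  simp only [pvLexKey, toLex_inj, Prod.mk.injEq] at h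
  obtain ⟨h1, h2, h3, h4⟩ := h
  simp [h1, h2, h3, h4]

lemma pvSorted2_eq_sorted (xs : List (String × String)) :
    PySem.List.sorted2 xs (fun p => p.1) (fun p => p.2)
      = PySem.List.sorted xs (fun p => toLex p) := by
  show List.foldl (fun acc x => PySem.List.insertBy
      (fun a b => decide (a.1 < b.1) || !decide (b.1 < a.1) && decide (a.2 < b.2)) x acc) [] xs
    = List.foldl (fun acc x => PySem.List.insertBy
      (fun a b => decide (toLex a < toLex b)) x acc) [] xs
  have hb : (fun (a b : String × String) =>
        decide (a.1 < b.1) || !decide (b.1 < a.1) && decide (a.2 < b.2))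
      = (fun a b => decide (toLex a < toLex b)) := by
    funext a b
    rcases lt_trichotomy a.1 b.1 with h | h | h
    · simp [Prod.Lex.toLex_lt_toLex, h]
    · simp [Prod.Lex.toLex_lt_toLex, h]
    · simp [Prod.Lex.toLex_lt_toLex, h, lt_asymm h, ne_of_gt h]
  rw [hb]

lemma pvPartPerm {α : Type} (l : List α) (key : α → String) (ks : List String)
    (hnd : ks.Nodup) (hcov : ∀ x ∈ l, key x ∈ ks) :
    (ks.flatMap (fun k => l.filter (fun x => key x == k))).Perm l := by
  induction ks generalizing l with
  | nil =>
    have : l = [] := List.eq_nil_iff_forall_not_mem.mpr (fun x hx => by simpa using hcov x hx)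
    simp [this]
  | cons k ks ih =>
    simp only [List.flatMap_cons]
    refine List.Perm.trans ?_ (List.filter_append_perm (fun x => key x == k) l)
    apply List.Perm.append_left
    have hcong : ks.flatMap (fun k' => l.filter (fun x => key x == k'))
        = ks.flatMap (fun k' => (l.filter (fun x => !(key x == k))).filter (fun x => key x == k')) := by
      refine (List.flatMap_congr ?_)
      intro k' hk'
      rw [List.filter_filter]
      refine (List.filter_congr ?_).symm
      intro x hx
      by_cases hxk : key x = k'
      · have hkk : k' ≠ k := by rintro rfl; exact (List.nodup_cons.mp hnd).1 hk'
        simp [hxk, hkk]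
      · simp [hxk]
    rw [hcong]
    exact ih _ (List.nodup_cons.mp hnd).2
      (fun x hx => by
        obtain ⟨hxl, hxk⟩ := List.mem_filter.mp hx
        have := hcov x hxl
        simp only [Bool.not_eq_eq_eq_not, Bool.not_true, beq_eq_false_iff_ne, ne_eq] at hxk
        simpa [hxk] using this)

lemma pvSS_nodup (Qs : List (String × String × String × String)) (b : String) :
    (pvSS Qs b).Nodup :=
  ((PySem.List.sorted_perm _ _ _).nodup_iff).mpr (PySem.Set.nodup_ofList _)

lemma pvSS_cov (Qs : List (String × String × String × String)) (b : String) :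
    ∀ q ∈ pvLb Qs b, q.2.1 ∈ pvSS Qs b := by
  intro q hq
  rw [pvSS, PySem.List.mem_sorted, PySem.Set.mem_ofList]
  exact List.mem_map_of_mem hq

lemma pvSB_nodup (Qs : List (String × String × String × String)) : (pvSB Qs).Nodup :=
  ((PySem.List.sorted_perm _ _ _).nodup_iff).mpr (PySem.Set.nodup_ofList _)

lemma pvSB_cov (Qs : List (String × String × String × String)) :
    ∀ q ∈ Qs, q.1 ∈ pvSB Qs := by
  intro q hq
  rw [pvSB, PySem.List.mem_sorted, PySem.Set.mem_ofList]
  exact List.mem_map_of_mem hq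

lemma pvC_perm (Qs : List (String × String × String × String)) : (pvC Qs).Perm Qs := by
  rw [pvC]
  refine List.Perm.trans (List.Perm.flatMap (List.Perm.refl (pvSB Qs)) ?_)
    (pvPartPerm Qs (fun q => q.1) (pvSB Qs) (pvSB_nodup Qs) (fun q hq => pvSB_cov Qs q hq))
  intro b _
  show ((pvSS Qs b).flatMap (fun s => (pvR Qs b s).map (pvBack b s))).Perm
      (Qs.filter (fun x => x.1 == b))
  refine List.Perm.trans (List.Perm.flatMap (List.Perm.refl (pvSS Qs b)) ?_)
    (pvPartPerm (pvLb Qs b) (fun q => q.2.1) (pvSS Qs b) (pvSS_nodup Qs b) (pvSS_cov Qs b))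
  intro s _
  show ((pvR Qs b s).map (pvBack b s)).Perm ((pvLb Qs b).filter (fun x => x.2.1 == s))
  refine ((PySem.List.sorted2_perm _ _ _ _).map (pvBack b s)).trans ?_
  rw [pvRows, List.map_map]
  have hid : ∀ q ∈ (pvLb Qs b).filter (fun q => q.2.1 == s), (pvBack b s ∘ fun q => q.2.2) q = q := by
    intro q hq
    obtain ⟨hq1, hq2⟩ := List.mem_filter.mp hq
    obtain ⟨_, hqb⟩ := List.mem_filter.mp hq1
    have hqb' : q.1 = b := by simpa using hqb
    have hqs : q.2.1 = s := by simpa using hq2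
    show (b, s, q.2.2.1, q.2.2.2) = q
    rw [← hqb', ← hqs]
  rw [List.map_congr_left hid]
  simp

lemma pvR_pairwise (Qs : List (String × String × String × String)) (b s : String) :
    (pvR Qs b s).Pairwise (fun p q => toLex p ≤ toLex q) := by
  rw [pvR, pvSorted2_eq_sorted]
  exact PySem.List.sorted_pairwise (pvRows Qs b s) (fun p => toLex p)

lemma pvKey1 {x y : String × String × String × String} (h : x.1 < y.1) :
    pvLexKey x ≤ pvLexKey y :=
  le_of_lt (Prod.Lex.toLex_lt_toLex.mpr (Or.inl h))

lemma pvKey2 {x y : String × String × String × String} (h1 : x.1 = y.1) (h2 : x.2.1 < y.2.1) :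
    pvLexKey x ≤ pvLexKey y :=
  Prod.Lex.toLex_le_toLex.mpr (Or.inr ⟨h1, le_of_lt (Prod.Lex.toLex_lt_toLex.mpr (Or.inl h2))⟩)

lemma pvKey3 {x y : String × String × String × String} (h1 : x.1 = y.1) (h2 : x.2.1 = y.2.1)
    (h3 : toLex (x.2.2.1, x.2.2.2) ≤ toLex (y.2.2.1, y.2.2.2)) :
    pvLexKey x ≤ pvLexKey y :=
  Prod.Lex.toLex_le_toLex.mpr (Or.inr ⟨h1, Prod.Lex.toLex_le_toLex.mpr (Or.inr ⟨h2, h3⟩)⟩)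

lemma pvC_pairwise (Qs : List (String × String × String × String)) :
    (pvC Qs).Pairwise (fun a b => pvLexKey a ≤ pvLexKey b) := by
  rw [pvC, List.pairwise_flatMap]
  constructor
  · intro b _
    rw [List.pairwise_flatMap]
    constructor
    · intro s _
      rw [List.pairwise_map]
      refine (pvR_pairwise Qs b s).imp ?_
      intro p q h
      exact pvKey3 rfl rfl h
    · have hpw : (pvSS Qs b).Pairwise (· < ·) := PySem.List.sorted_ofList_pairwise_lt _
      refine hpw.imp ?_
      intro s s' hss x hx y hy
      obtain ⟨p, _, rfl⟩ := List.mem_map.mp hx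
      obtain ⟨q, _, rfl⟩ := List.mem_map.mp hy
      exact pvKey2 rfl hss
  · have hpw : (pvSB Qs).Pairwise (· < ·) := PySem.List.sorted_ofList_pairwise_lt _
    refine hpw.imp ?_
    intro b b' hbb x hx y hy
    obtain ⟨s, _, hx2⟩ := List.mem_flatMap.mp hx
    obtain ⟨p, _, rfl⟩ := List.mem_map.mp hx2
    obtain ⟨s', _, hy2⟩ := List.mem_flatMap.mp hy
    obtain ⟨q, _, rfl⟩ := List.mem_map.mp hy2
    exact pvKey1 hbb

lemma pvSorted_eq_C (Qs : List (String × String × String × String)) :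
    PySem.List.sorted Qs pvLexKey = pvC Qs := by
  apply PySem.List.eq_of_perm_of_pairwise_le_of_injective pvLexKey pvLexKey_injective
  · exact (PySem.List.sorted_perm Qs pvLexKey false).trans (pvC_perm Qs).symm
  · exact PySem.List.sorted_pairwise Qs pvLexKey
  · exact pvC_pairwise Qs

lemma pvScan_rows (fds : List (String × String)) (b s : String) (acc : List String) :
    (fds.map (pvBack b s)).foldl pvScanStep (some b, some s, acc)
      = (some b, some s, acc ++ fds.map pvRow) := by
  induction fds generalizing acc with
  | nil => simp
  | cons fd fds ih =>
    simp only [List.map_cons, List.foldl_cons]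
    have hstep : pvScanStep (some b, some s, acc) (pvBack b s fd)
        = (some b, some s, acc ++ [pvRow fd]) := by
      simp [pvScanStep, pvBack, pvRow]
    rw [hstep, ih]
    simp

lemma pvScan_subs (Qs : List (String × String × String × String)) (b : String)
    (ss : List String) (cs : Option String) (acc : List String)
    (hpw : ss.Pairwise (· < ·)) (hne : ∀ s ∈ ss, pvR Qs b s ≠ [])
    (hcs : ∀ s ∈ ss, cs ≠ some s) :
    ∃ cs', (ss.flatMap (fun s => (pvR Qs b s).map (pvBack b s))).foldl pvScanStep (some b, cs, acc)
      = (some b, cs', acc ++ ss.flatMap (pvG Qs b)) := by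
  induction ss generalizing cs acc with
  | nil => exact ⟨cs, by simp⟩
  | cons s ss ih =>
    obtain ⟨fd0, fds, hR⟩ := List.exists_cons_of_ne_nil (hne s (by simp))
    simp only [List.flatMap_cons, List.foldl_append, hR, List.map_cons, List.foldl_cons]
    have hstep : pvScanStep (some b, cs, acc) (pvBack b s fd0)
        = (some b, some s, acc ++ ["  " ++ s ++ "/", pvRow fd0]) := by
      have hne' : cs ≠ some s := hcs s (by simp)
      simp [pvScanStep, pvBack, pvRow, hne']
    rw [hstep, pvScan_rows]
    obtain ⟨cs', hrest⟩ := ih (some s)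
      (acc ++ ["  " ++ s ++ "/", pvRow fd0] ++ fds.map pvRow)
      hpw.tail (fun t ht => hne t (by simp [ht]))
      (fun t ht => by
        have : s < t := (List.pairwise_cons.mp hpw).1 t ht
        simpa using (ne_of_lt this))
    refine ⟨cs', ?_⟩
    rw [hrest]
    simp [pvG, hR]

lemma pvScan_branches (Qs : List (String × String × String × String))
    (bs : List String) (cb cs : Option String) (acc : List String)
    (hpw : bs.Pairwise (· < ·)) (hcb : ∀ b ∈ bs, cb ≠ some b)
    (hss : ∀ b ∈ bs, (pvSS Qs b) ≠ [] ∧ (pvSS Qs b).Pairwise (· < ·) ∧ ∀ s ∈ pvSS Qs b, pvR Qs b s ≠ []) :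
    ∃ cb' cs', (bs.flatMap (fun b => (pvSS Qs b).flatMap (fun s => (pvR Qs b s).map (pvBack b s)))).foldl
        pvScanStep (cb, cs, acc)
      = (cb', cs', acc ++ bs.flatMap (pvF Qs)) := by
  induction bs generalizing cb cs acc with
  | nil => exact ⟨cb, cs, by simp⟩
  | cons b bs ih =>
    obtain ⟨hSSne, hSSpw, hRne⟩ := hss b (by simp)
    obtain ⟨s0, ss, hSS⟩ := List.exists_cons_of_ne_nil hSSne
    obtain ⟨fd0, fds, hR⟩ := List.exists_cons_of_ne_nil (hRne s0 (by rw [hSS]; simp))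
    simp only [List.flatMap_cons, List.foldl_append, hSS, hR, List.map_cons, List.foldl_cons]
    have hstep : pvScanStep (cb, cs, acc) (pvBack b s0 fd0)
        = (some b, some s0, acc ++ [b ++ "/", "  " ++ s0 ++ "/", pvRow fd0]) := by
      have hne' : cb ≠ some b := hcb b (by simp)
      simp [pvScanStep, pvBack, pvRow, hne']
    rw [hstep, pvScan_rows]
    have hSSpw' : ss.Pairwise (· < ·) := by rw [hSS] at hSSpw; exact hSSpw.tail
    obtain ⟨cs', hsubs⟩ := pvScan_subs Qs b ss (some s0)
      (acc ++ [b ++ "/", "  " ++ s0 ++ "/", pvRow fd0] ++ fds.map pvRow)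
      hSSpw' (fun t ht => hRne t (by rw [hSS]; simp [ht]))
      (fun t ht => by
        rw [hSS] at hSSpw
        have : s0 < t := (List.pairwise_cons.mp hSSpw).1 t ht
        simpa using (ne_of_lt this))
    rw [hsubs]
    obtain ⟨cb', cs'', hrest⟩ := ih (some b) cs'
      (acc ++ [b ++ "/", "  " ++ s0 ++ "/", pvRow fd0] ++ fds.map pvRow ++ ss.flatMap (pvG Qs b))
      hpw.tail
      (fun t ht => by
        have : b < t := (List.pairwise_cons.mp hpw).1 t ht
        simpa using (ne_of_lt this))
      (fun t ht => hss t (by simp [ht]))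
    refine ⟨cb', cs'', ?_⟩
    rw [hrest]
    simp [pvF, pvG, hSS, hR]

lemma pvSS_ne_nil (Qs : List (String × String × String × String)) (b : String)
    (hb : b ∈ pvSB Qs) : pvSS Qs b ≠ [] := by
  rw [pvSB, PySem.List.mem_sorted, PySem.Set.mem_ofList] at hb
  obtain ⟨q, hq, rfl⟩ := List.mem_map.mp hb
  have : q ∈ pvLb Qs q.1 := List.mem_filter.mpr ⟨hq, by simp⟩
  exact List.ne_nil_of_mem (pvSS_cov Qs q.1 q this)

lemma pvR_ne_nil (Qs : List (String × String × String × String)) (b s : String)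
    (hs : s ∈ pvSS Qs b) : pvR Qs b s ≠ [] := by
  rw [pvSS, PySem.List.mem_sorted, PySem.Set.mem_ofList] at hs
  obtain ⟨q, hq, rfl⟩ := List.mem_map.mp hs
  have hrow : q.2.2 ∈ pvRows Qs b q.2.1 :=
    List.mem_map_of_mem (List.mem_filter.mpr ⟨hq, by simp⟩)
  intro hnil
  have hperm : (pvR Qs b q.2.1).Perm (pvRows Qs b q.2.1) := PySem.List.sorted2_perm _ _ _ _
  rw [hnil] at hperm
  rw [← hperm.nil_eq] at hrow
  simp at hrow

lemma pvB_eq_lines (leaves : List (String × String × String)) :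
    generate_tree_compact_alt leaves = PySem.Str.join "\n" (pvLines (leaves.map pvQuad)) := by
  have h0 : generate_tree_compact_alt leaves = PySem.Str.join "\n"
      (((PySem.List.sorted (leaves.map pvQuad) pvLexKey).foldl
        pvScanStep (none, none, [])).2.2) := rfl
  rw [h0, pvSorted_eq_C]
  obtain ⟨cb', cs', heq⟩ := pvScan_branches (leaves.map pvQuad) (pvSB (leaves.map pvQuad))
    none none [] (PySem.List.sorted_ofList_pairwise_lt _) (fun b _ => by simp)
    (fun b hb => ⟨pvSS_ne_nil _ b hb, PySem.List.sorted_ofList_pairwise_lt _,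
      fun s hs => pvR_ne_nil _ b s hs⟩)
  rw [pvC, heq]
  simp [pvLines]

-- ===== VERDICT (by name: the statement is the Claim_ definition above) =====
theorem generate_tree_compact_spec : Claim_equal_generate_tree_compact := by
  intro leaves _
  unfold Spec_generate_tree_compact
  rw [pvA_eq_lines, pvB_eq_lines]
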